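-- pv_equiv track=rewrite | github.com/pisterlabs/promptset | data/scraping-2.0/repos/shmup~chad.vim/chad.py | parse_buffer
-- ===== SOURCE A (Python) =====
-- def parse_buffer(buffer_content):
--   messages, role, content = [], None, []
--   for line in buffer_content.splitlines():
--     if line.startswith("### "):
--       if role:
--         messages.append({"role": role, "content": "\n".join(content).strip()})
--       role, content = line[4:].lower(), []
--     else:
--       content.append(line)
--   if role:
--     messages.append({"role": role, "content": "\n".join(content).strip()})
--   return messages
-- ===== SOURCE B (Python) =====
-- def parse_buffer(buffer_content):
--     messages, pending = [], []
--     for line in reversed(buffer_content.splitlines()):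
--         if line.startswith("### "):
--             role = line[4:].lower()
--             if role:
--                 messages.insert(0, {"role": role, "content": "\n".join(pending).strip()})
--             pending = []
--         else:
--             pending.insert(0, line)
--     return messages
-- ===== Notes on version B (the rewrite author's own statement) =====
-- stated objective: alternative
-- what changed: B scans the lines back-to-front with a single pending-content list and emits each message the moment its header is seen, instead of A's forward pass that carries a current role and flushes the previous message at the next header plus a final flush after the loop.
import Mathlib
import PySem

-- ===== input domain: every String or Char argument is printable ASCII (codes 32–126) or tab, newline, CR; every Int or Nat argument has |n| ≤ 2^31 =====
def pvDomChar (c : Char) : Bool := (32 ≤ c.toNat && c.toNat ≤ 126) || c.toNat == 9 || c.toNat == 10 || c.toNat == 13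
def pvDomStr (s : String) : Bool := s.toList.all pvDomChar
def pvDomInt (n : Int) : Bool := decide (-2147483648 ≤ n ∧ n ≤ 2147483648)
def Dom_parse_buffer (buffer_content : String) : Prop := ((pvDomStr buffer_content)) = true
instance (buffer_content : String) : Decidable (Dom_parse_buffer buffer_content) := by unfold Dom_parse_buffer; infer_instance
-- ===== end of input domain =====

-- B parses the buffer back-to-front (emit a message at each header from a pending-content list) instead of A's forward accumulate-and-flush pass; return values proved equal on all inputs.


-- the dict {"role": role, "content": "\n".join(content).strip()} (shared literal)
def pvMsg (role : String) (content : List String) : List (String × String) :=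
  [("role", role), ("content", PySem.Str.strip (PySem.Str.join "\n" content))]

-- ===== PORT A =====
-- loop body of A's forward pass; state = (messages, role, content); role = "" plays Python's None (both falsy, role is otherwise a nonempty-testable str)
def pvStepA (st : List (List (String × String)) × String × List String) (line : String) :
    List (List (String × String)) × String × List String :=
  if PySem.Str.startswith line "### " then
    ((if st.2.1 ≠ "" then st.1 ++ [pvMsg st.2.1 st.2.2] else st.1),
     PySem.Str.lower (PySem.Str.slice line (some 4) none), [])
  else (st.1, st.2.1, st.2.2 ++ [line])

def parse_buffer (buffer_content : String) : List (List (String × String)) :=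
  let st := (PySem.Str.splitlines buffer_content).foldl pvStepA ([], "", [])
  if st.2.1 ≠ "" then st.1 ++ [pvMsg st.2.1 st.2.2] else st.1

-- ===== PORT B =====
-- loop body of B's reversed pass; state = (messages, pending); insert(0, …) = cons
def pvStepB (st : List (List (String × String)) × List String) (line : String) :
    List (List (String × String)) × List String :=
  if PySem.Str.startswith line "### " then
    let role := PySem.Str.lower (PySem.Str.slice line (some 4) none)
    ((if role ≠ "" then pvMsg role st.2 :: st.1 else st.1), [])
  else (st.1, line :: st.2)

def parse_buffer_alt (buffer_content : String) : List (List (String × String)) :=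
  ((PySem.Str.splitlines buffer_content).reverse.foldl pvStepB ([], [])).1

-- ===== PRECONDITION & SPEC =====
def Spec_parse_buffer (buffer_content : String) (out : List (List (String × String))) : Prop := out = parse_buffer_alt buffer_content
instance (buffer_content : String) (out : List (List (String × String))) : Decidable (Spec_parse_buffer buffer_content out) := by unfold Spec_parse_buffer; infer_instance

-- ===== CLAIM (what is proved, stated in full; the proofs are below) =====
def Claim_equal_parse_buffer : Prop := ∀ (buffer_content : String), Dom_parse_buffer buffer_content → Spec_parse_buffer buffer_content (parse_buffer buffer_content)

-- ===== LEMMAS AND PROOFS =====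

-- the message emitted for a (role, content) segment, empty for a falsy role
def pvFlush (role : String) (content : List String) : List (List (String × String)) :=
  if role ≠ "" then [pvMsg role content] else []

-- canonical recursive description of the segmentation; `pending` is extra content appended to the LAST segment only
def pvSp : List String → String → List String → List String → List (List (String × String))
  | [], role, content, pending => pvFlush role (content ++ pending)
  | l :: ls, role, content, pending =>
    if PySem.Str.startswith l "### " then
      pvFlush role content ++ pvSp ls (PySem.Str.lower (PySem.Str.slice l (some 4) none)) [] pending
    else pvSp ls role (content ++ [l]) pending

theorem pvA_sp (ls : List String) : ∀ (msgs : List (List (String × String))) (role : String)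
    (content : List String),
    (let st := ls.foldl pvStepA (msgs, role, content);
     if st.2.1 ≠ "" then st.1 ++ [pvMsg st.2.1 st.2.2] else st.1)
      = msgs ++ pvSp ls role content [] := by
  induction ls with
  | nil =>
    intro msgs role content
    simp only [List.foldl_nil, pvSp, List.append_nil, pvFlush]
    split <;> simp
  | cons l ls ih =>
    intro msgs role content
    simp only [List.foldl_cons, pvStepA, pvSp]
    by_cases h : PySem.Str.startswith l "### " = true
    · simp only [h, if_pos, ih, pvFlush]
      split <;> simp
    · simp only [h, ih]
      simp

theorem pvB_sp (ls : List String) : ∀ (pending : List String),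
    ∃ M P, (∀ msgs, ls.foldr (fun l st => pvStepB st l) (msgs, pending) = (M ++ msgs, P)) ∧
      (∀ role content, pvSp ls role content pending = pvFlush role (content ++ P) ++ M) := by
  induction ls with
  | nil =>
    intro pending
    exact ⟨[], pending, fun msgs => by simp, fun role content => by simp [pvSp, pvFlush]⟩
  | cons l ls ih =>
    intro pending
    obtain ⟨M, P, hfold, hsp⟩ := ih pending
    by_cases h : PySem.Str.startswith l "### " = true
    · refine ⟨pvFlush (PySem.Str.lower (PySem.Str.slice l (some 4) none)) P ++ M, [], ?_, ?_⟩
      · intro msgs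
        rw [List.foldr_cons, hfold msgs]
        simp only [pvStepB, h, if_pos, pvFlush]
        split <;> simp
      · intro role content
        simp only [pvSp, h, if_pos, hsp, pvFlush]
        split <;> simp
    · refine ⟨M, l :: P, ?_, ?_⟩
      · intro msgs
        have e4 : "### ".toList = ['#', '#', '#', ' '] := rfl
        have h' : PySem.Chars.startswith l.toList ['#', '#', '#', ' '] = false := by
          simpa [e4] using h
        rw [List.foldr_cons, hfold msgs]
        simp [pvStepB, h']
      · intro role content
        simp only [pvSp, h, hsp]
        simp
-- ===== VERDICT (by name: the statement is the Claim_ definition above) =====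
theorem parse_buffer_spec : Claim_equal_parse_buffer := by
  intro s _
  unfold Spec_parse_buffer parse_buffer parse_buffer_alt
  obtain ⟨M, P, hfold, hsp⟩ := pvB_sp (PySem.Str.splitlines s) []
  have hA := pvA_sp (PySem.Str.splitlines s) [] "" []
  simp only [List.nil_append] at hA
  rw [hA, List.foldl_reverse, hfold]
  simp [hsp, pvFlush]
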